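-- pv_equiv track=rewrite | github.com/shinzan7/Algorithm | 프로그래머스/unrated/138476. 귤 고르기/귤 고르기.py | solution
-- ===== SOURCE A (Python) =====
-- import collections
--
-- def solution(k, tangerine):
--     answer = 0
--
--     c = collections.Counter(tangerine).most_common()
--     n = 0
--
--     for i in range(len(c)):
--         n += c[i][1]
--         answer += 1
--         if(n >= k):
--             break
--
--     return answer
-- ===== SOURCE B (Python) =====
-- def solution(k, tangerine):
--     freq = {}
--     for t in tangerine:
--         freq[t] = freq.get(t, 0) + 1
--     if not freq:
--         return 0
--     maxf = max(freq.values())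
--     buckets = {}
--     for v in freq.values():
--         buckets[v] = buckets.get(v, 0) + 1
--     n = 0
--     answer = 0
--     for c in range(maxf, 0, -1):
--         for _ in range(buckets.get(c, 0)):
--             n += c
--             answer += 1
--             if n >= k:
--                 return answer
--     return answer
-- ===== Notes on version B (the rewrite author's own statement) =====
-- stated objective: alternative
-- what changed: Replaces Counter.most_common()'s comparison sort with a counting-sort traversal: a frequency-of-frequencies dict is scanned from the maximum count down to 1, adding each count bucket-by-bucket until k is covered.
import Mathlib
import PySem

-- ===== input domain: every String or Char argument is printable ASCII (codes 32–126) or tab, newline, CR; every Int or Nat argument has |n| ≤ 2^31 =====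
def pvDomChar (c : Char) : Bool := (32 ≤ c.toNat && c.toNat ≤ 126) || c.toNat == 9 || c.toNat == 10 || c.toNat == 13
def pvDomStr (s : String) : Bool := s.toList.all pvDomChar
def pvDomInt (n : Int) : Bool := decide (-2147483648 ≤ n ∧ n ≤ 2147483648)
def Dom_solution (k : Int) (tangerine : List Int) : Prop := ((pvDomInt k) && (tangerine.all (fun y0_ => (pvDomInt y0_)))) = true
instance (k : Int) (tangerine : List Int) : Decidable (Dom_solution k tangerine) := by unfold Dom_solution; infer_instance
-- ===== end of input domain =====

-- B replaces most_common()'s comparison sort by a counting-sort scan over a frequency-of-frequencies table (alternative algorithm, same results).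

-- ===== PORT A =====
-- for i in range(len(c)): n += c[i][1]; answer += 1; if n >= k: break   (loop with break → structural recursion over c)
def solutionLoopA (k : Int) : Int → Int → List (Int × Int) → Int
  | _, answer, [] => answer
  | n, answer, p :: rest =>
    if n + p.2 ≥ k then answer + 1 else solutionLoopA k (n + p.2) (answer + 1) rest

-- Counter(tangerine).most_common() = sorted(counter.items(), key=itemgetter(1), reverse=True)
def solution (k : Int) (tangerine : List Int) : Int :=
  solutionLoopA k 0 0 (PySem.List.sorted (PySem.Dict.counter tangerine).items (fun p => p.2) true)

-- ===== PORT B =====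
-- inner 'for _ in range(buckets.get(c, 0))' with early return: some answer = returned
def solutionAltInner (k c : Int) : Nat → Int → Int → Option Int × Int × Int
  | 0, n, answer => (none, n, answer)
  | m + 1, n, answer =>
    if n + c ≥ k then (some (answer + 1), n + c, answer + 1)
    else solutionAltInner k c m (n + c) (answer + 1)

-- outer 'for c in range(maxf, 0, -1)'
def solutionAltOuter (k : Int) (buckets : PySem.Dict Int Int) : List Int → Int → Int → Int
  | [], _, answer => answer
  | c :: cs, n, answer =>
    match solutionAltInner k c (buckets.getD c 0).toNat n answer with
    | (some r, _, _) => r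
    | (none, n', answer') => solutionAltOuter k buckets cs n' answer'

def solution_alt (k : Int) (tangerine : List Int) : Int :=
  let freq := tangerine.foldl (fun d t => d.insert t (d.getD t 0 + 1)) PySem.Dict.empty
  if freq.items = [] then 0
  else
    match PySem.List.max? freq.values (fun v => v) with
    | none => 0  -- unreachable: values nonempty when items nonempty (Python's max would raise only here)
    | some maxf =>
      let buckets := freq.values.foldl (fun d v => d.insert v (d.getD v 0 + 1)) PySem.Dict.empty
      solutionAltOuter k buckets (PySem.List.pyRange maxf 0 (-1)) 0 0

-- ===== PRECONDITION & SPEC =====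
def Spec_solution (k : Int) (tangerine : List Int) (out : Int) : Prop := out = solution_alt k tangerine
instance (k : Int) (tangerine : List Int) (out : Int) : Decidable (Spec_solution k tangerine out) := by unfold Spec_solution; infer_instance

-- ===== CLAIM (what is proved, stated in full; the proofs are below) =====
def Claim_equal_solution : Prop := ∀ (k : Int) (tangerine : List Int), Dom_solution k tangerine → Spec_solution k tangerine (solution k tangerine)

-- ===== LEMMAS AND PROOFS =====

-- the common abstraction: scan a list of counts, stopping as soon as k is reached
def pvScan (k : Int) : Int → Int → List Int → Int
  | _, answer, [] => answer
  | n, answer, c :: rest => if n + c ≥ k then answer + 1 else pvScan k (n + c) (answer + 1) rest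

theorem loopA_eq_scan (k : Int) (ps : List (Int × Int)) : ∀ n a,
    solutionLoopA k n a ps = pvScan k n a (ps.map (·.2)) := by
  induction ps with
  | nil => intro n a; rfl
  | cons p rest ih =>
    intro n a
    simp only [solutionLoopA, List.map, pvScan]
    split_ifs with h
    · rfl
    · exact ih _ _

theorem inner_eq_scan (k c : Int) (rest : List Int) : ∀ (m : Nat) (n a : Int),
    pvScan k n a (List.replicate m c ++ rest) =
      (match solutionAltInner k c m n a with
       | (some r, _, _) => r
       | (none, n', a') => pvScan k n' a' rest) := by
  intro m
  induction m with
  | zero => intro n a; rfl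
  | succ m ih =>
    intro n a
    simp only [List.replicate, List.cons_append, pvScan, solutionAltInner]
    split_ifs with h
    · rfl
    · exact ih _ _

theorem outer_eq_scan (k : Int) (buckets : PySem.Dict Int Int) (cs : List Int) : ∀ n a,
    solutionAltOuter k buckets cs n a =
      pvScan k n a (cs.flatMap (fun c => List.replicate (buckets.getD c 0).toNat c)) := by
  induction cs with
  | nil => intro n a; rfl
  | cons c cs ih =>
    intro n a
    simp only [solutionAltOuter, List.flatMap_cons]
    rw [inner_eq_scan]
    cases h : solutionAltInner k c (buckets.getD c 0).toNat n a with
    | mk o p =>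
      cases o with
      | some r => simp
      | none => cases p with | mk n' a' => simp [ih n' a']

theorem count_flatMap_replicate (f : Int → Nat) (x : Int) (cs : List Int) (hnd : cs.Nodup) :
    (cs.flatMap (fun c => List.replicate (f c) c)).count x = if x ∈ cs then f x else 0 := by
  induction cs with
  | nil => simp
  | cons c cs ih =>
    simp only [List.flatMap_cons, List.count_append, List.nodup_cons] at *
    rw [ih hnd.2, List.count_replicate]
    by_cases hx : x = c
    · subst hx
      simp [hnd.1]
    · simp [hx, Ne.symm hx]

theorem pairwise_flatMap_replicate (f : Int → Nat) (cs : List Int)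
    (h : cs.Pairwise (· > ·)) :
    (cs.flatMap (fun c => List.replicate (f c) c)).Pairwise (· ≥ ·) := by
  induction cs with
  | nil => simp
  | cons c cs ih =>
    rw [List.pairwise_cons] at h
    simp only [List.flatMap_cons]
    rw [List.pairwise_append]
    refine ⟨?_, ih h.2, ?_⟩
    · exact List.pairwise_replicate.mpr (Or.inr le_rfl)
    · intro x hx y hy
      rw [List.eq_of_mem_replicate hx]
      rcases List.mem_flatMap.mp hy with ⟨c', hc', hy'⟩
      rw [List.eq_of_mem_replicate hy']
      exact le_of_lt (h.1 c' hc')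

theorem pyRange_down_pairwise_gt (a : Int) : (PySem.List.pyRange a 0 (-1)).Pairwise (· > ·) := by
  rw [PySem.List.pyRange_neg_one_eq_reverse]
  rw [List.pairwise_reverse]
  exact PySem.List.pairwise_lt_pyRange_one 1 (a + 1)

theorem counter_values_pos (t : List Int) (v : Int) (hv : v ∈ (PySem.Dict.counter t).values) : 1 ≤ v := by
  have : (PySem.Dict.counter t).values = (PySem.Set.ofList t).map (fun k => (t.count k : Int)) := by
    show ((PySem.Dict.counter t).items).map (·.2) = _
    rw [PySem.Dict.items_counter]
    simp
  rw [this] at hv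
  rcases List.mem_map.mp hv with ⟨x, hx, rfl⟩
  have hxm : x ∈ t := (PySem.Set.mem_ofList t x).mp hx
  have := List.count_pos_iff.mpr hxm
  omega

-- the heart: the descending list of counts A scans equals B's counting-sort traversal
theorem lists_eq (t : List Int) (maxf : Int)
    (hmax : PySem.List.max? (PySem.Dict.counter t).values (fun v => v) = some maxf) :
    ((PySem.List.sorted (PySem.Dict.counter t).items (fun p => p.2) true).map (·.2)) =
      (PySem.List.pyRange maxf 0 (-1)).flatMap
        (fun c => List.replicate ((PySem.Dict.counter (PySem.Dict.counter t).values).getD c 0).toNat c) := by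
  set vs := (PySem.Dict.counter t).values with hvs
  have hgt := pyRange_down_pairwise_gt maxf
  have hnd : (PySem.List.pyRange maxf 0 (-1)).Nodup := hgt.imp (fun h => ne_of_gt h)
  -- B's list counts
  have hcnt : ∀ c : Int, ((PySem.Dict.counter vs).getD c 0).toNat = vs.count c := by
    intro c
    rw [PySem.Dict.getD_counter]
    simp
  -- permutations
  have permA : ((PySem.List.sorted (PySem.Dict.counter t).items (fun p => p.2) true).map (·.2)).Perm vs := by
    exact (PySem.List.sorted_perm (PySem.Dict.counter t).items (fun p => p.2) true).map (fun p : Int × Int => p.2)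
  have permB : ((PySem.List.pyRange maxf 0 (-1)).flatMap
      (fun c => List.replicate ((PySem.Dict.counter vs).getD c 0).toNat c)).Perm vs := by
    rw [List.perm_iff_count]
    intro x
    rw [count_flatMap_replicate _ _ _ hnd, hcnt]
    by_cases hx : x ∈ PySem.List.pyRange maxf 0 (-1)
    · simp [hx]
    · simp only [hx, if_false]
      by_cases hxv : x ∈ vs
      · exfalso
        apply hx
        rw [PySem.List.mem_pyRange_neg_one]
        have h1 := counter_values_pos t x hxv
        have h2 := PySem.List.max?_isMax hmax x hxv
        simp at h2
        omega
      · simp [List.count_eq_zero.mpr hxv]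
  -- sortedness
  have sortA : (((PySem.List.sorted (PySem.Dict.counter t).items (fun p => p.2) true).map (·.2)).Pairwise (· ≥ ·)) := by
    have := PySem.List.sorted_pairwise_rev (PySem.Dict.counter t).items (fun p => p.2)
    exact List.Pairwise.map _ (fun a b h => h) this
  have sortB := pairwise_flatMap_replicate
      (fun c => ((PySem.Dict.counter vs).getD c 0).toNat) _ hgt
  exact List.Perm.eq_of_pairwise (fun a b _ _ h1 h2 => le_antisymm h2 h1) sortA sortB (permA.trans permB.symm)

theorem counter_items_ne_nil (x : Int) (t : List Int) (hx : x ∈ t) :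
    (PySem.Dict.counter t).items ≠ [] := by
  rw [PySem.Dict.items_counter]
  intro h
  have : x ∈ PySem.Set.ofList t := (PySem.Set.mem_ofList t x).mpr hx
  rcases List.map_eq_nil_iff.mp h with h'
  simp [h'] at this

-- ===== VERDICT (by name: the statement is the Claim_ definition above) =====
theorem solution_spec : Claim_equal_solution := by
  intro k tangerine _
  show solution k tangerine = solution_alt k tangerine
  unfold solution solution_alt
  simp only [PySem.Dict.foldl_insert_getD_add_one_eq_counter]
  cases tangerine with
  | nil => rfl
  | cons x t =>
    have hne := counter_items_ne_nil x (x :: t) (List.mem_cons_self)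
    rw [if_neg hne]
    have hvne : (PySem.Dict.counter (x :: t)).values ≠ [] := by
      intro h
      apply hne
      exact List.map_eq_nil_iff.mp (h : ((PySem.Dict.counter (x :: t)).items).map (·.2) = [])
    cases hmax : PySem.List.max? (PySem.Dict.counter (x :: t)).values (fun v => v) with
    | none =>
      exact absurd ((PySem.List.max?_eq_none_iff _ _).mp hmax) hvne
    | some maxf =>
      simp only [loopA_eq_scan, outer_eq_scan]
      rw [lists_eq (x :: t) maxf hmax]
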